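-- pv_equiv track=rewrite | github.com/asafkessler/6130_Python | course_6130/EX2/ex2b.py | check_start_end_points
-- ===== SOURCE A (Python) =====
-- def check_start_end_points(maze):
--     """
--     This functions checks weather there are well-defined Starting and Target points in the maze.
--     :param maze: (matrix) List of lists of all the maze information.
--     :return: (boolean) True - their are S & T points False otherwise.
--     """
--     flag_state = [False, False]
--
--     for curr_list in maze:
--         for value2 in curr_list:
--             if value2 == 'S':
--                 flag_state[0] = True
--             elif value2 == 'T':
--                 flag_state[1] = True
--             else:
--                 continue
--     if flag_state[0] == True & flag_state[1] == True:
--         return True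
--     else:
--         return False
-- ===== SOURCE B (Python) =====
-- def check_start_end_points(maze):
--     """Two staged short-circuiting searches: find 'S' first (stopping at the first
--     hit), and only if found, run a second independent search for 'T'. A instead
--     makes one exhaustive pass over every cell maintaining two flags."""
--     def has_cell(target):
--         for row in maze:
--             if target in row:
--                 return True
--         return False
--     return has_cell('S') and has_cell('T')
-- ===== Notes on version B (the rewrite author's own statement) =====
-- stated objective: alternative
-- what changed: Replaces A's single exhaustive nested scan with two flag accumulators (and its chained-comparison final test) by two staged short-circuiting searches: a helper that scans rows and returns at the first row containing the target, run once for 'S' and, only if that succeeds, once for 'T'.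
import Mathlib
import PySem

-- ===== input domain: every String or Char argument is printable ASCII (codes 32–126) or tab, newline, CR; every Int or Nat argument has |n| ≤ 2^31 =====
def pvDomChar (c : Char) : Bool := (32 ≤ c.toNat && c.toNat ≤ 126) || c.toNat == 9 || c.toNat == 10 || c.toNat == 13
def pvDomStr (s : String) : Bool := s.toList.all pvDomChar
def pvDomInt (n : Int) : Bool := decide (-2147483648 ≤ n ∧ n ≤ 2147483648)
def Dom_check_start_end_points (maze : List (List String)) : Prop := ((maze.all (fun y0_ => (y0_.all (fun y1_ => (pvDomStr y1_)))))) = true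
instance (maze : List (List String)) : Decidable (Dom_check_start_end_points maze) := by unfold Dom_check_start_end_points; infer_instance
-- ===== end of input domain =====

-- B replaces A's single exhaustive two-flag scan by two staged short-circuiting searches ('S' first, then 'T'); alternative decomposition, same cost.


-- ===== PORT A =====
-- literal port of A: nested loop setting two flags, then the chained comparison
-- flag_state[0] == (True & flag_state[1]) == True, ported step for step.
def check_start_end_points (maze : List (List String)) : Bool :=
  let flags : Bool × Bool :=
    maze.foldl (fun st curr_list =>
      curr_list.foldl (fun st value2 =>
        if value2 == "S" then (true, st.2)
        else if value2 == "T" then (st.1, true)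
        else st) st) (false, false)
  -- Python: flag_state[0] == True & flag_state[1] == True  (chained ==, & binds tighter)
  if (flags.1 == (true && flags.2)) && ((true && flags.2) == true) then true else false

-- ===== PORT B =====
-- B's helper: loop over rows with early return at the first row containing target
def pvHasCell (rows : List (List String)) (target : String) : Bool :=
  match rows with
  | [] => false
  | row :: rest => if row.contains target then true else pvHasCell rest target

-- port of B: search for "S"; only if found, run an independent search for "T"
def check_start_end_points_alt (maze : List (List String)) : Bool :=
  pvHasCell maze "S" && pvHasCell maze "T"

-- ===== PRECONDITION & SPEC =====
def Spec_check_start_end_points (maze : List (List String)) (out : Bool) : Prop := out = check_start_end_points_alt maze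
instance (maze : List (List String)) (out : Bool) : Decidable (Spec_check_start_end_points maze out) := by unfold Spec_check_start_end_points; infer_instance

-- ===== CLAIM =====
def Claim_equal_check_start_end_points : Prop := ∀ (maze : List (List String)), Dom_check_start_end_points maze → Spec_check_start_end_points maze (check_start_end_points maze)

-- ===== LEMMAS AND PROOFS =====

-- the inner loop over one row ors each flag with membership of "S"/"T" in that row
theorem inner_flags (row : List String) (st : Bool × Bool) :
    row.foldl (fun st value2 =>
        if value2 == "S" then (true, st.2)
        else if value2 == "T" then (st.1, true)
        else st) st = (st.1 || row.contains "S", st.2 || row.contains "T") := by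
  induction row generalizing st with
  | nil => simp
  | cons x xs ih =>
    simp only [List.foldl_cons, List.contains_cons, ih]
    by_cases hS : x == "S"
    · simp [hS, (by simpa using hS : x = "S")]
    · by_cases hT : x == "T"
      · simp [(by simpa using hT : x = "T")]
      · have hS' : ¬ x = "S" := by simpa using hS
        have hT' : ¬ x = "T" := by simpa using hT
        have e1 : ("S" == x) = false := beq_eq_false_iff_ne.mpr (Ne.symm hS')
        have e2 : ("T" == x) = false := beq_eq_false_iff_ne.mpr (Ne.symm hT')
        simp [hS, hT, e1, e2]

-- A's whole scan computes, for each flag, whether some row contains the marker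
theorem outer_flags (maze : List (List String)) (st : Bool × Bool) :
    maze.foldl (fun st curr_list =>
      curr_list.foldl (fun st value2 =>
        if value2 == "S" then (true, st.2)
        else if value2 == "T" then (st.1, true)
        else st) st) st
    = (st.1 || maze.any (fun r => r.contains "S"),
       st.2 || maze.any (fun r => r.contains "T")) := by
  induction maze generalizing st with
  | nil => simp
  | cons r rs ih =>
    rw [List.foldl_cons, inner_flags, ih]
    simp [Bool.or_assoc]

-- B's short-circuiting search decides the same "some row contains target" predicate
theorem hasCell_eq_any (rows : List (List String)) (target : String) :
    pvHasCell rows target = rows.any (fun r => r.contains target) := by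
  induction rows with
  | nil => rfl
  | cons r rs ih =>
    simp only [pvHasCell, ih, List.any_cons]
    by_cases h : r.contains target <;> simp [h]

-- ===== VERDICT =====
theorem check_start_end_points_spec : Claim_equal_check_start_end_points := by
  intro maze _
  unfold Spec_check_start_end_points check_start_end_points check_start_end_points_alt
  simp only [outer_flags, Bool.false_or, hasCell_eq_any]
  cases maze.any (fun r => r.contains "S") <;>
    cases maze.any (fun r => r.contains "T") <;> rfl
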